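/-
  THE ONE DECODE-TIME INVARIANT OF THE STATEMENT LAYER: `Vorbis.Spec.DecodeInv others frames len Ar stored room ysz mem f`.

  It is the precondition and the postcondition (for the SAME ghosts) of every decode-time function: vorbis_decode_initial,
  vorbis_decode_packet, vorbis_decode_packet_rest, vorbis_finish_frame, vorbis_pump_first_frame, stb_vorbis_get_frame_float
  (Vorbis/Spec/Top.lean, PacketRest.lean), decode_residue (DecodeResidue.lean: "`DecodeInv` + `Args`"), inverse_mdct (MdctTop.lean:
  "`DecodeInv` + the arguments"); stb_vorbis_open_memory establishes it (its post), decode_all's loop carries it. It replaces S6's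
  `vorbis_decode_packet_rest.Inv` and S9's `Top.DecodePt` (the union of their fields; what follows from the others is a THEOREM
  of the same name, so that `h.offStack`, `h.inp`, `h.log2` … keep working).

      FIELDS     fb      `Real.FB len (Ar, others) (RunBlk Ar len) (LiveSet others frames) mem f stored room`: Env ∧ VorbisOK f ∧ ADO idle
                 sep     SEP (`Separated`, Vorbis/Invariant/Stores.lean) — with the `codeword_lengths` blocks: `BookApart` is a theorem
                 hand    THE HAND-OVER CARRIER `Hand others frames len Ar f` (Vorbis/Spec/Common.lean): memory-independent
                 obj     `*f` is a setup block of the arena                   buf    every non-empty sample buffer is one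
                 consts  SH7 for `log2_4`, `range_list` (`Consts mem`)        fy     FY1 with the sizes NAMED (`ysz c`)
                 cfg     every block the configuration READS is a setup block of the arena (not a fixed object: not OUT)
      THEOREMS   .inp .out .globals .arenaText .g_range .g_log2 .g_db .log2 .range      projections of `hand` / `consts`
                 .arena .len_le .config .ok .live .ob1                                  projections of `fb`
                 .offStack .offGap .objOff                                              where allocated blocks are NOT
                 .books / .bookApart                                                    `BookApart` of every codebook (from SEP)
                 .objLive .chanLive .bufLive .readerEnv .arenaPre-shaped facts           `LiveIn` forms for the callees
                 .global_kept .tables_kept .frame_stores                                THE DECODE-TIME FRAME (S6's `Inv.frame_stores`)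
                 .withEnv .push .carry                                                  another list of active frames (S6, S9)
                 .cfg_transfer, readsArena_transfer / _extends / _move                  how `cfg` is carried and established
-/
import Vorbis.Spec.Common
namespace Vorbis.Spec
open X86 X86.User Asan

/-- **THE DECODE-TIME INVARIANT at one memory**, for the live non-stack objects `others` and the active protected frames `frames`
(at a function's boundary: the caller's; at a cut point inside a protected function: with its own frame in front). Ghosts: `len`
the length of the input, `Ar` the arena (the block predicate is the run's, `RunBlk Ar len`: concrete, so that the fixed objects
are known to be allocated and a callee's abstract `Blk` can be instantiated), `stored`, `room` decode_all's counters (carried,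
never used), `ysz c` the size of the allocated block at `finalY[c]` (FY1 says "some size": a footprint needs it named). `f` is the
arena copy of the decoder object.

`fb` is the program point FB (`Env` ∧ `VorbisOK f` ∧ ADO idle): the MUTABLE part — `Bits`, W1, M7, ADO — is restated with the memory
of every cut point; the CONFIG part and `sep` are carried by `ConfigOK.frame_stores` (`DecodeInv.frame_stores`).

WHY `obj` AND `buf` ("`*f` and the sample buffers are SETUP BLOCKS OF THE ARENA"): the invariant as landed says "an allocated
block" (`RunBlk` = "arena block OR fixed object"), and decode time needs more, twice: (1) the contracts of `memset`, `error`,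
`draw_line`, decode_residue's `Args.buf` and of the bit reader take `LiveIn` — "inside ONE object of the live list" —, which a
bytewise-live block does not give; a setup block of the arena IS an object of `others` (AR6: `liveIn_of_arenaBlk`); (2) SH7 for
`range_list` / `log2_4` over a store into `finalY[c]`: nothing else excludes that the allocated block at `finalY[c]` (of some
size, possibly 16) is the block of one of these globals; an arena block lies inside the arena, a global outside (AR6x).

WHY `cfg` ("every block the configuration READS is a SETUP BLOCK OF THE ARENA"): CONFIG says of the blocks it reads — the codebooks
block, the `codeword_lengths` / `sorted_values` blocks, the floor, residue, mapping records and their tables, the bit-reverse tables,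
the comment table (`ConfigOK.Reads`) — only that each is an allocated block of `RunBlk Ar len` (`ConfigOK.reads_blk`), and `RunBlk` is
"arena block OR FIXED OBJECT": the input, THE OUTPUT BUFFER and the six globals are `RunBlk`s too. So nothing excluded that a block
the configuration reads IS the output buffer, and then the one decode-time store into a fixed object — decode_all's copy_frame into
OUT, between two calls of stb_vorbis_get_frame_float — could not be shown to keep the invariant (`DecodeInv.frame_stores` wants
`StoreOK`, `carry` wants `AllKept`: both false for a store into the allocated block OUT). With `cfg` the blocks read lie inside the
arena, OUT outside (`Hand.outside`): `decode_all.da_reads_ne_out`, `decode_all.da_out_stores`. The clause is a theorem at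
start_decoder's exit (`StartDecoder.Done.reads_arena`); stb_vorbis_open_memory takes it over vorbis_alloc and the copy `*f = p`
(`readsArena_extends`, `readsArena_move` at the end of this file); every decode-time step carries it by `ConfigOK.reads_back`
(`DecodeInv.cfg_transfer`: the configuration's windows of `*f` read the same and the blocks read are kept — what `frame_stores`,
`carry` have in hand anyway). It cannot live outside the invariant: stb_vorbis_get_frame_float and vorbis_pump_first_frame export
nothing but `DecodeInv` of the NEW memory over a footprint that is the whole arena (design/INVARIANTS-errata.md). -/
structure DecodeInv (others : List Obj) (frames : List (Nat × FrameLayout)) (len : Nat) (Ar : Arena) (stored room : Int)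
    (ysz : Nat → Nat) (mem : Mem) (f : Nat) : Prop where
  /-- FB: the shadow covers the live set, allocated blocks are lawful and live; `VorbisOK f`; ADO idle (`T = L`, no temp block) -/
  fb : Real.FB len (Ar, others) (RunBlk Ar len) (LiveSet others frames) mem f stored room
  /-- SEP: the configuration blocks (the `codeword_lengths` blocks among them), the sample buffers and `*f` are pairwise disjoint -/
  sep : Separated (RunBlk Ar len) mem f
  /-- the hand-over carrier: `*f`, the input, the output inside ONE live object each; the globals as objects; `arenaText`; `outside` -/
  hand : Hand others frames len Ar f
  /-- `*f` is a setup block of the arena (`P5.self`) -/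
  obj : Ar.Blk (objBlock f)
  /-- every non-empty sample buffer is a setup block of the arena (`StartDecoder.Done.buf_arena`) -/
  buf : ∀ C, SampleBuf (RunBlk Ar len) mem f C → C.size = 0 ∨ Ar.Blk C
  /-- SH7 for `log2_4` and `range_list` -/
  consts : Consts mem
  /-- FY1 with the sizes named -/
  fy : ∀ c : Nat, (c : Int) < stb_vorbis.channels mem f →
    RunBlk Ar len ⟨stb_vorbis.finalY mem f c, ysz c⟩ ∧
      ∀ i : Nat, (i : Int) < stb_vorbis.floor_count mem f →
        2 * Floor1.values mem (stb_vorbis.floor_config_at mem f i) ≤ (ysz c : Int)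
  /-- every block the configuration reads is a setup block of the arena (`StartDecoder.Done.reads_arena`): none is a fixed object,
  in particular none is the output buffer, into which decode_all's copy_frame stores -/
  cfg : ∀ B, ConfigOK.Reads mem f B → Ar.Blk B

/-- SH7 for the two tables in a memory in which their blocks read the same. -/
theorem Consts.kept {mem mem' : Mem} (h : Consts mem)
    (k1 : (Block.mk Vorbis.Globals.log2_4.beg Vorbis.Globals.log2_4.size).Kept mem mem')
    (k2 : (Block.mk Vorbis.Globals.range_list.beg Vorbis.Globals.range_list.size).Kept mem mem') : Consts mem' := by
  constructor
  · intro i hi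
    have e := k1.u8 (Vorbis.Globals.log2_4.beg + i) (by simp only []; omega)
      (by simp only [Vorbis.Globals.log2_4]; omega)
    have e' : mem'.readLE (UInt64.ofNat (Vorbis.Globals.log2_4.beg + i)) 1
        = mem.readLE (UInt64.ofNat (Vorbis.Globals.log2_4.beg + i)) 1 := e
    rw [e']
    exact h.log2 i hi
  · exact h.range.frame k2.same (by decide)

/-- A global of the image is one of the fixed objects, hence an allocated block of the run's predicate. -/
theorem runBlk_global (Ar : Arena) (len : Nat) {G : Block} (hG : G ∈ globalBlocks) : RunBlk Ar len G := by
  apply runBlk_extra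
  unfold fixedBlocks
  exact List.mem_cons_of_mem _ (List.mem_cons_of_mem _ hG)

/-- `range_list` is the second registered global. -/
theorem range_list_global :
    (Block.mk Vorbis.Globals.range_list.beg Vorbis.Globals.range_list.size) ∈ globalBlocks := by
  show (Block.mk 0x120600 16) ∈ globalBlocks
  unfold globalBlocks
  exact List.mem_cons_of_mem _ List.mem_cons_self

/-- `log2_4` is the third registered global. -/
theorem log2_4_global :
    (Block.mk Vorbis.Globals.log2_4.beg Vorbis.Globals.log2_4.size) ∈ globalBlocks := by
  show (Block.mk 0x120640 16) ∈ globalBlocks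
  unfold globalBlocks
  exact List.mem_cons_of_mem _ (List.mem_cons_of_mem _ List.mem_cons_self)

namespace DecodeInv
variable {others : List Obj} {frames frames' : List (Nat × FrameLayout)} {len : Nat} {Ar : Arena} {stored room : Int}
  {ysz : Nat → Nat} {mem mem' : Mem} {f : Nat}

/-! ### What follows from the fields (the former fields of S6's `Inv` / S9's `DecodePt`, under their old names) -/

/-- The input lies inside ONE live object (`ReaderEnv.inp`). -/
theorem inp (h : DecodeInv others frames len Ar stored room ysz mem f) : 0 < len → LiveIn others frames IN len :=
  h.hand.inp

/-- The output buffer lies inside ONE live object. -/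
theorem out (h : DecodeInv others frames len Ar stored room ysz mem f) :
    LiveIn others frames blockOUT.base blockOUT.size :=
  h.hand.out

/-- The six registered globals are objects of the live list. -/
theorem globals (h : DecodeInv others frames len Ar stored room ysz mem f) : ∀ o, o ∈ Vorbis.Globals.objs → o ∈ others :=
  h.hand.globals

/-- The arena lies above the image's text (the allocators' `ArenaPre.offText`). -/
theorem arenaText (h : DecodeInv others frames len Ar stored room ysz mem f) : L.textHi ≤ Ar.B :=
  h.hand.arenaText

/-- SH5: `range_list` is an object of the live list. -/
theorem g_range (h : DecodeInv others frames len Ar stored room ysz mem f) : Vorbis.Globals.range_list.obj ∈ others :=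
  h.hand.g_range

/-- SH5: `log2_4` is an object of the live list. -/
theorem g_log2 (h : DecodeInv others frames len Ar stored room ysz mem f) : Vorbis.Globals.log2_4.obj ∈ others :=
  h.hand.g_log2

/-- SH5: `inverse_db_table` is an object of the live list. -/
theorem g_db (h : DecodeInv others frames len Ar stored room ysz mem f) : Vorbis.Globals.inverse_db_table.obj ∈ others :=
  h.hand.g_db

/-- SH7: the sixteen bytes of `log2_4` (the value of `ilog`). -/
theorem log2 (h : DecodeInv others frames len Ar stored room ysz mem f) : Log2_4In mem :=
  h.consts.log2

/-- SH7: `range_list` = {256, 128, 86, 64}. -/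
theorem range (h : DecodeInv others frames len Ar stored room ysz mem f) : RangeListOK mem Vorbis.Globals.range_list.beg :=
  h.consts.range

/-- AR1 – AR6 of the arena (ADO's first half). -/
theorem arena (h : DecodeInv others frames len Ar stored room ysz mem f) : ArenaOK Ar others mem f :=
  h.fb.ado.ok

/-- S1: the input is at most 1FF000H bytes long. -/
theorem len_le (h : DecodeInv others frames len Ar stored room ysz mem f) : len ≤ 0x1FF000 :=
  h.fb.vorbis.bits.S1.2.2

/-- The CONFIG part of `VorbisOK f`. -/
theorem config (h : DecodeInv others frames len Ar stored room ysz mem f) : ConfigOK (RunBlk Ar len) mem f :=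
  Real.VorbisOK.config h.fb.vorbis

/-- The allocated blocks are lawful. -/
theorem ok (h : DecodeInv others frames len Ar stored room ysz mem f) : BlkOK (RunBlk Ar len) :=
  h.fb.env.ok

/-- Every allocated block is live. -/
theorem live (h : DecodeInv others frames len Ar stored room ysz mem f) : BlkLive (RunBlk Ar len) (LiveSet others frames) :=
  h.fb.env.live

/-- OB1: `*f` is an allocated block. -/
theorem ob1 (h : DecodeInv others frames len Ar stored room ysz mem f) : RunBlk Ar len (objBlock f) :=
  Real.VorbisOK.obj h.fb.vorbis

/-- **No allocated block meets the stack region** (`DecodeResidue.BlkFree.offStack`): a push, a spill, a store into a stack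
object is `StoreOK.off`. -/
theorem offStack (h : DecodeInv others frames len Ar stored room ysz mem f) :
    ∀ B, RunBlk Ar len B → B.base + B.size ≤ 0x700000 ∨ 0x800000 ≤ B.base :=
  h.hand.offStack h.arena h.len_le

/-- **No allocated block meets the free part `[B + S, B + L)` of the arena** (`DecodeResidue.BlkFree.offGap`): a store into a
temp block is `StoreOK.off`. -/
theorem offGap (h : DecodeInv others frames len Ar stored room ysz mem f) :
    ∀ B, RunBlk Ar len B → B.base + B.size ≤ Ar.B + Ar.S ∨ Ar.B + Ar.L ≤ B.base :=
  h.hand.offGap h.arena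

/-- `*f` (an arena block) lies off the stack region. -/
theorem objOff (h : DecodeInv others frames len Ar stored room ysz mem f) :
    f + Off.sizeof.stb_vorbis ≤ 0x700000 ∨ 0x800000 ≤ f :=
  h.offStack _ (runBlk_setup h.obj)

/-- **The blocks of every codebook are apart from `*f`** (`BookApart`: what every decode through a codebook asks): a theorem of
CONFIG and SEP (`Separated.bookApart`). -/
theorem books (h : DecodeInv others frames len Ar stored room ysz mem f) :
    ∀ i : Nat, (i : Int) < stb_vorbis.codebook_count mem f → BookApart mem f (stb_vorbis.codebooks_at mem f i) :=
  fun i hi => h.sep.bookApart h.config i hi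

/-- **`*f` lies inside ONE live object**: the setup block of the arena copy is an object of `others` (AR6). It is `error.spec`'s
precondition; with `h.live` and `h.inp` it is `ReaderEnv` (`DecodeInv.readerEnv`). (Also `h.hand.obj`.) -/
theorem objLive (h : DecodeInv others frames len Ar stored room ysz mem f) : LiveIn others frames f Off.sizeof.stb_vorbis :=
  h.hand.obj

/-- **A non-empty sample buffer lies inside ONE live object**: it is a setup block of the arena, hence an object of `others`. -/
theorem bufLive (h : DecodeInv others frames len Ar stored room ysz mem f) {C : Block}
    (hC : SampleBuf (RunBlk Ar len) mem f C) (hpos : 0 < C.size) : LiveIn others frames C.base C.size := by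
  rcases h.buf C hC with h0 | hb
  · omega
  · exact liveIn_of_arenaBlk h.arena hb

/-- **A channel buffer lies inside ONE live object** (`memset.spec`, `draw_line.spec`, decode_residue's `Args.buf` ask for this
form). -/
theorem chanLive (h : DecodeInv others frames len Ar stored room ysz mem f) {c : Nat}
    (hc : (c : Int) < stb_vorbis.channels mem f) (hpos : 0 < bsize mem f 1) :
    LiveIn others frames (stb_vorbis.channel_buffers mem f c) (4 * bsize mem f 1) :=
  h.bufLive (SampleBuf.chan c hc) (by simp only []; omega)

/-- S2's `ReaderEnv` (the memory-independent part of every packet reader's precondition). -/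
theorem readerEnv (h : DecodeInv others frames len Ar stored room ysz mem f) :
    ReaderEnv others frames (RunBlk Ar len) len f :=
  h.hand.readerEnv h.live

/-! ### How the invariant is established -/

/-- **The hand-over carrier at decode time from the one of start_decoder time**: IN / OUT / the globals / `arenaText` / `outside`
are those of the carrier for the stack object `p` (any frames, any address); `*f'` is the arena copy, an object of `others` by
AR6. -/
theorem hand_of_arenaBlk {p : Nat} {mem : Mem} {f : Nat} (h : Hand others frames len Ar p) (hA : ArenaOK Ar others mem f)
    (hobj : Ar.Blk (objBlock f)) : Hand others frames len Ar f :=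
  ⟨liveIn_of_arenaBlk hA hobj, h.inp, h.out, h.globals, h.arenaText, h.outside⟩

/-- **FY1 with the sizes named**: a choice of sizes exists (FY1 says "an allocated block of some size"). How
stb_vorbis_open_memory picks the ghost `ysz` of its postcondition. -/
theorem exists_ysz {Blk : Block → Prop} {mem : Mem} {f : Nat} (hfy : FY1 Blk mem f) :
    ∃ ysz : Nat → Nat, ∀ c : Nat, (c : Int) < stb_vorbis.channels mem f →
      Blk ⟨stb_vorbis.finalY mem f c, ysz c⟩ ∧
        ∀ i : Nat, (i : Int) < stb_vorbis.floor_count mem f →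
          2 * Floor1.values mem (stb_vorbis.floor_config_at mem f i) ≤ (ysz c : Int) := by
  have hex : ∀ c : Nat, ∃ sz : Nat, (c : Int) < stb_vorbis.channels mem f →
      Blk ⟨stb_vorbis.finalY mem f c, sz⟩ ∧
        ∀ i : Nat, (i : Int) < stb_vorbis.floor_count mem f →
          2 * Floor1.values mem (stb_vorbis.floor_config_at mem f i) ≤ (sz : Int) := by
    intro c
    by_cases hc : (c : Int) < stb_vorbis.channels mem f
    · obtain ⟨sz, h1, h2⟩ := hfy c hc
      exact ⟨sz, fun _ => ⟨h1, h2⟩⟩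
    · exact ⟨0, fun hc' => absurd hc' hc⟩
  exact ⟨fun c => Classical.choose (hex c), fun c hc => Classical.choose_spec (hex c) hc⟩

/-! ### The pieces of every frame lemma: `buf` and `fy` follow the object -/

/-- `buf` in a memory in which the configuration's windows of `*f` read the same. -/
theorem buf_transfer (h : DecodeInv others frames len Ar stored room ysz mem f) (he : ObjEq ConfigOK.wins mem f mem' f) :
    ∀ C, SampleBuf (RunBlk Ar len) mem' f C → C.size = 0 ∨ Ar.Blk C := by
  intro C hC
  exact h.buf C (SampleBuf.back he h.config.header.HD1.2 (fun _ _ _ hb => hb) hC)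

/-- `fy` in a memory in which the configuration's windows of `*f` read the same and the floor block is kept. -/
theorem fy_transfer (h : DecodeInv others frames len Ar stored room ysz mem f) (he : ObjEq ConfigOK.wins mem f mem' f)
    (hfk : (floorBlock mem f).Kept mem mem') :
    ∀ c : Nat, (c : Int) < stb_vorbis.channels mem' f →
      RunBlk Ar len ⟨stb_vorbis.finalY mem' f c, ysz c⟩ ∧
        ∀ i : Nat, (i : Int) < stb_vorbis.floor_count mem' f →
          2 * Floor1.values mem' (stb_vorbis.floor_config_at mem' f i) ≤ (ysz c : Int) := by
  have hcfg := h.config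
  obtain ⟨ech, _, eptr⟩ := ConfigOK.buffers_eq he hcfg.header.HD1.2
  have hfl : FloorHdrEq mem f mem' f := FloorHdrEq.of_objEq (he.sub (by decide))
  intro c hc
  rw [ech] at hc
  obtain ⟨hblk, hsz⟩ := h.fy c hc
  rw [(eptr c hc).2.2]
  refine ⟨hblk, ?_⟩
  intro i hi
  rw [hfl.floor_count] at hi
  rw [hfl.floor_config_at i]
  have hg : IsFloor mem f (stb_vorbis.floor_config_at mem f i) := IsFloor.of_lt hi
  have hek := hcfg.floor.toFloorShape.elem_kept hg hfk
  rw [Floor1.same_values hek.same hek.inside]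
  exact hsz i hi

/-- `cfg` in a memory in which the configuration's windows of `*f` read the same and the blocks the configuration reads are kept:
the blocks read in the new memory ARE the blocks read in the old one (`ConfigOK.reads_back`). -/
theorem cfg_transfer (h : DecodeInv others frames len Ar stored room ysz mem f) (he : ObjEq ConfigOK.wins mem f mem' f)
    (hk : ∀ B, ConfigOK.Reads mem f B → B.Kept mem mem') : ∀ B, ConfigOK.Reads mem' f B → Ar.Blk B := by
  intro B hR
  exact h.cfg B (h.config.reads_back he hk hR)

/-! ### THE DECODE-TIME FRAME -/

/-- **A registered global that is an object of the live list is kept by a batch of decode-time stores**: a store into a hole of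
`*f` or into a sample buffer goes into a setup block of the arena (`obj`, `buf`), and a global lies outside the arena (AR6x); a
store that is off every allocated block is off the global, which is one. -/
theorem global_kept (h : DecodeInv others frames len Ar stored room ysz mem f) {d : GlobalDesc}
    (hd : d.obj ∈ others) (hG : (Block.mk d.beg d.size) ∈ globalBlocks) (hwrap : d.beg + d.size ≤ 2 ^ 64) (hpos : 0 < d.size)
    {spans : List Span} (hs : Mem.SameExcept spans mem mem')
    (hw : ∀ s, s ∈ spans → StoreOK (RunBlk Ar len) mem f s) : (Block.mk d.beg d.size).Kept mem mem' := by
  have hok : ArenaOK Ar others mem f := h.arena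
  have hout := hok.other_outside hd (by simp only [GlobalDesc.obj]; decide) (by simp only [GlobalDesc.obj]; decide)
  simp only [GlobalDesc.obj] at hout
  have h2 := hok.AR2
  apply Block.Kept.of_sameExcept hs _ hwrap
  intro s hsp
  simp only []
  cases hw s hsp with
  | hole hh =>
    have hr := hok.block_range (p := f) (n := Off.sizeof.stb_vorbis) h.obj
    have hl := le_r8 Off.sizeof.stb_vorbis
    simp only [voff] at hr hl
    unfold InHole at hh
    omega
  | buffer C hC h1 h2' =>
    rcases h.buf C hC with h0 | hb
    · have hblk : RunBlk Ar len C := SampleBuf.blk h.config hC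
      rcases h.ok.apart C _ hblk (runBlk_global Ar len hG) with e | hdis
      · rw [e] at h0
        simp only [] at h0
        omega
      · simp only [vblock] at hdis
        omega
    · have hr := hok.block_range (p := C.base) (n := C.size) hb
      have hl := le_r8 C.size
      omega
  | off hoff =>
    have := hoff _ (runBlk_global Ar len hG)
    simp only [] at this
    omega

/-- SH7 for the two tables over a batch of decode-time stores. -/
theorem tables_kept (h : DecodeInv others frames len Ar stored room ysz mem f) {spans : List Span}
    (hs : Mem.SameExcept spans mem mem') (hw : ∀ s, s ∈ spans → StoreOK (RunBlk Ar len) mem f s) : Consts mem' := by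
  have k1 : (Block.mk Vorbis.Globals.log2_4.beg Vorbis.Globals.log2_4.size).Kept mem mem' :=
    h.global_kept h.g_log2 log2_4_global (by decide) (by decide) hs hw
  have k2 : (Block.mk Vorbis.Globals.range_list.beg Vorbis.Globals.range_list.size).Kept mem mem' :=
    h.global_kept h.g_range range_list_global (by decide) (by decide) hs hw
  exact h.consts.kept k1 k2

/-- **THE DECODE-TIME FRAME OF THE INVARIANT**: a batch of stores, each into a hole of `*f`, a sample buffer, or off every
allocated block (`StoreOK`: the walker's `Mem.SameExcept`, a callee's footprint), keeps the whole invariant, given the MUTABLE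
part of the new memory: the environment of a check site (from the shadow layer: `ShadowInv.covers`, or `Env.eqOn` when no shadow
byte was written), ADO (`ADO.frame_stores`, or the callee's post), `Bits`, M7, W1 (from the function's own stores / the callee's
post; each may use `DecodeSame f mem mem'`). Everything else — CONFIG, SEP, the hand-over carrier, the arena facts, the named
`finalY` sizes, SH7 — is carried here. -/
theorem frame_stores (h : DecodeInv others frames len Ar stored room ysz mem f) {spans : List Span}
    (hs : Mem.SameExcept spans mem mem') (hw : ∀ s, s ∈ spans → StoreOK (RunBlk Ar len) mem f s)
    (henv : Env (RunBlk Ar len) (Asan.Live (stackObjs frames ++ others)) mem')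
    (hado : ADO Ar others mem' f)
    (hb : DecodeSame f mem mem' → Bits (RunBlk Ar len) len mem' f)
    (h7 : DecodeSame f mem mem' → Mdct.M7Range mem' f)
    (hw1 : DecodeSame f mem mem' → W1 mem' f) :
    DecodeInv others frames len Ar stored room ysz mem' f := by
  have hv := h.fb.vorbis
  have hcfg := h.config
  have hok := h.ok
  have hob := h.ob1
  obtain ⟨hv', hsep'⟩ := Real.VorbisOK.frame_stores hv hok h.sep hs hw hb h7 hw1
  obtain ⟨_, _, hd⟩ := hcfg.frame_stores hok hob h.sep hs hw
  have hk := StoreOK.reads_kept hcfg hok h.sep hs hw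
  have he : ObjEq ConfigOK.wins mem f mem' f := hd.sub ConfigOK.wins_decode
  have hfk := hk _ ConfigOK.Reads.floor
  exact ⟨⟨henv, hv', hado, h.fb.stored_nonneg, h.fb.stored_le⟩, hsep', h.hand, h.obj, h.buf_transfer he,
    h.tables_kept hs hw, h.fy_transfer he hfk, h.cfg_transfer he hk⟩

/-! ### The invariant when the list of active protected frames changes (a prologue, an epilogue) -/

/-- **The invariant for another list of active frames**: only the environment of a check site (`Covers`, `BlkLive` for the new
live set) and the one-object clauses of the hand-over carrier mention the frames. (Segment .15 of vorbis_decode_packet_rest uses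
it with the caller's `frames`: `BlkLive` and the carrier are those of the function's precondition — memory-independent —, `Covers`
is `ShadowInv.covers` after the epilogue.) -/
theorem withEnv (h : DecodeInv others frames len Ar stored room ysz mem f)
    (henv : Env (RunBlk Ar len) (Asan.Live (stackObjs frames' ++ others)) mem)
    (hhand : Hand others frames' len Ar f) : DecodeInv others frames' len Ar stored room ysz mem f :=
  ⟨⟨henv, h.fb.vorbis, h.fb.ado, h.fb.stored_nonneg, h.fb.stored_le⟩, h.sep, hhand, h.obj, h.buf, h.consts, h.fy, h.cfg⟩

/-- **The invariant with MORE active frames** (after a prologue: the function's own frame in front): every live object is still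
one, so allocated blocks stay live and the one-object ranges stay inside their objects; `Covers` for the new live set is
`ShadowInv.covers` of the layer after the prologue (`ShadowInv.prologue_ra`). -/
theorem push (h : DecodeInv others frames len Ar stored room ysz mem f)
    (hsub : ∀ o, o ∈ stackObjs frames ++ others → o ∈ stackObjs frames' ++ others)
    (hc : Covers (Asan.Live (stackObjs frames' ++ others)) mem) : DecodeInv others frames' len Ar stored room ysz mem f := by
  have hl : ∀ x, Asan.Live (stackObjs frames ++ others) x → Asan.Live (stackObjs frames' ++ others) x := by
    intro x hx
    obtain ⟨o, ho, hb⟩ := hx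
    exact ⟨o, hsub o ho, hb⟩
  apply h.withEnv ⟨hc, h.ok, BlkLive.mono h.live hl⟩
  exact ⟨h.hand.obj.mono hsub, fun hlen => (h.hand.inp hlen).mono hsub, h.hand.out.mono hsub, h.hand.globals,
    h.hand.arenaText, h.hand.outside⟩

/-- **THE INVARIANT UNDER ANOTHER LIST OF FRAMES AND A CHANGED STACK / SHADOW** — the step of every protected function of the frame
pipeline, twice: after its prologue (its own frame pushed: `frames' = (base, F) :: frames`, the memory changed in the shadow and on
the stack only) and after its epilogue (popped). `hk`: every block of the decode-time predicate reads the same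
(`AllKept.of_sameExcept` for a footprint that meets no block: the stack by `DecodeInv.offStack`, the shadow because the blocks lie
in the data space). `hinv0` / `hinv`: the shadow layer before and after. The live set changes; the blocks stay live because none
of their bytes ever was a stack object's. -/
theorem carry {top0 top : Nat} (h : DecodeInv others frames len Ar stored room ysz mem f)
    (hinv0 : ShadowInv others frames top0 mem) (hk : AllKept (RunBlk Ar len) mem mem')
    (hinv : ShadowInv others frames' top mem') : DecodeInv others frames' len Ar stored room ysz mem' f := by
  have hA : ArenaOK Ar others mem f := h.arena
  have hob : RunBlk Ar len (objBlock f) := h.ob1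
  have hlive : BlkLive (RunBlk Ar len) (LiveSet others frames') := by
    intro B hB i hi
    have hx := h.live B hB i hi
    have hoff := h.offStack B hB
    obtain ⟨o, ho, hb⟩ := live_others hinv0 hx (by omega)
    exact ⟨o, List.mem_append_right _ ho, hb⟩
  have he : ObjEq ConfigOK.wins mem f mem' f := ObjEq.of_kept_obj (hk _ hob) (by decide)
  have hcfg := h.config
  have hfk : (floorBlock mem f).Kept mem mem' := hk _ (hcfg.reads_blk ConfigOK.Reads.floor)
  have k1 : (Block.mk Vorbis.Globals.log2_4.beg Vorbis.Globals.log2_4.size).Kept mem mem' :=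
    hk _ (runBlk_global Ar len log2_4_global)
  have k2 : (Block.mk Vorbis.Globals.range_list.beg Vorbis.Globals.range_list.size).Kept mem mem' :=
    hk _ (runBlk_global Ar len range_list_global)
  refine ⟨⟨⟨hinv.shadow.covers, h.ok, hlive⟩, ?_, ?_, h.fb.stored_nonneg, h.fb.stored_le⟩, ?_,
    h.hand.reframe hinv0 h.len_le h.objOff, h.obj, h.buf_transfer he, h.consts.kept k1 k2, h.fy_transfer he hfk,
    h.cfg_transfer he (fun B hR => hk B (hcfg.reads_blk hR))⟩
  · exact Real.VorbisOK.carries len _ _ _ _ _ hk (fun _ hb => hb) hob h.fb.vorbis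
  · exact ADO.transfer h.fb.ado (ObjEq.of_kept_obj (hk _ hob) (by decide))
  · exact h.sep.frame hcfg he (fun B hR => hk B (hcfg.reads_blk hR))

end DecodeInv

/-! ### How the clause `cfg` is established (stb_vorbis_open_memory) and carried: "every block CONFIG reads is an arena block" -/

/-- **The clause over a change of memory (and of the object's address) whose effect on the configuration is known**: the windows of
the new object read as those of the old one, the blocks the old configuration reads are kept (`ConfigOK.reads_back`). -/
theorem readsArena_transfer {Blk : Block → Prop} {A : Arena} {mem mem' : Mem} {p f : Nat} (h : ConfigOK Blk mem p)
    (he : ObjEq ConfigOK.wins mem p mem' f) (hk : ∀ B, ConfigOK.Reads mem p B → B.Kept mem mem')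
    (hc : ∀ B, ConfigOK.Reads mem p B → A.Blk B) : ∀ B, ConfigOK.Reads mem' f B → A.Blk B := by
  intro B hR
  exact hc B (h.reads_back he hk hR)

/-- **The clause over an allocator call**: the arena ghost grew (`Arena.Extends`: vorbis_alloc in stb_vorbis_open_memory), a setup
block stays one (`Arena.Blk.mono`). -/
theorem readsArena_extends {A A' : Arena} {mem : Mem} {f : Nat} (hext : A.Extends A')
    (hc : ∀ B, ConfigOK.Reads mem f B → A.Blk B) : ∀ B, ConfigOK.Reads mem f B → A'.Blk B := by
  intro B hR
  exact (hc B hR).mono hext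

/-- **The clause over the transport `*f = p`** (memcpy into the fresh arena block: `Move`): the copy's windows read as the original's
(`Move.objEq`), every block allocated before the copy is kept (`Move.kept`). -/
theorem readsArena_move {Blk Blk' : Block → Prop} {A : Arena} {mem mem' : Mem} {p f : Nat} (hm : Move Blk Blk' mem mem' p f)
    (h : ConfigOK Blk mem p) (hc : ∀ B, ConfigOK.Reads mem p B → A.Blk B) : ∀ B, ConfigOK.Reads mem' f B → A.Blk B := by
  apply readsArena_transfer h (hm.objEq (by decide)) _ hc
  intro B hR
  exact hm.kept (h.reads_blk hR)

end Vorbis.Spec
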